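-- pv_equiv track=rewrite | github.com/alessiagargiulo2595-png/amalficoast-travel | fix_apostrophes.py | fix_js_content
-- ===== SOURCE A (Python) =====
-- BACKSLASH = chr(92)
--
-- APOS = chr(39)
--
-- def fix_js_content(js):
--     """Fix escaped apostrophes in JavaScript code.
--     In single-quoted strings containing \': convert string to double-quoted.
--     In double-quoted strings: remove the backslash before '.
--     """
--     result = []
--     i = 0
--     n = len(js)
--
--     while i < n:
--         ch = js[i]
--
--         # Double-quoted string
--         if ch == '"':
--             j = i + 1
--             s = ['"']
--             while j < n:
--                 if js[j] == BACKSLASH and j + 1 < n: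
--                     esc = js[j+1]
--                     if esc == APOS:
--                         s.append(APOS)  # remove backslash, keep apostrophe
--                         j += 2
--                     else:
--                         s.append(js[j])
--                         s.append(js[j+1])
--                         j += 2
--                 elif js[j] == '"':
--                     s.append('"')
--                     j += 1
--                     break
--                 else:
--                     s.append(js[j])
--                     j += 1
--             result.append(''.join(s))
--             i = j
--
--         # Single-quoted string
--         elif ch == APOS:
--             j = i + 1
--             s_inner = []
--             has_escaped_apos = False
--             while j < n:
--                 if js[j] == BACKSLASH and j + 1 < n:
--                     esc = js[j+1]
--                     if esc == APOS:
--                         s_inner.append(APOS)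
--                         has_escaped_apos = True
--                         j += 2
--                     else:
--                         s_inner.append(js[j])
--                         s_inner.append(js[j+1])
--                         j += 2
--                 elif js[j] == APOS:
--                     j += 1
--                     break
--                 else:
--                     s_inner.append(js[j])
--                     j += 1
--             inner = ''.join(s_inner)
--             if has_escaped_apos:
--                 # Convert to double quotes
--                 inner_escaped = inner.replace('"', BACKSLASH + '"')
--                 result.append('"' + inner_escaped + '"')
--             else:
--                 result.append(APOS + inner + APOS)
--             i = j
--
--         # Template literal
--         elif ch == '`':
--             j = i + 1
--             s = ['`']
--             while j < n:
--                 if js[j] == BACKSLASH and j + 1 < n: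
--                     s.append(js[j])
--                     s.append(js[j+1])
--                     j += 2
--                 elif js[j] == '`':
--                     s.append('`')
--                     j += 1
--                     break
--                 else:
--                     s.append(js[j])
--                     j += 1
--             result.append(''.join(s))
--             i = j
--
--         else:
--             result.append(ch)
--             i += 1
--
--     return ''.join(result)
-- ===== SOURCE B (Python) =====
-- BACKSLASH = chr(92)
--
-- APOS = chr(39)
--
--
-- def fix_js_content(js):
--     """Fix escaped apostrophes in JavaScript code, as a single flat
--     character-at-a-time state machine (no nested scanning loops)."""
--     OUT, DQ, SQ, TPL = 0, 1, 2, 3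
--     state = OUT
--     pend = False      # a backslash was read; its escape partner is pending
--     buf = []          # collected content of the current single-quoted string
--     saw = False       # escaped apostrophe seen in current single-quoted string
--     out = []
--
--     def flush_single():
--         inner = ''.join(buf)
--         if saw:
--             return '"' + inner.replace('"', BACKSLASH + '"') + '"'
--         return APOS + inner + APOS
--
--     for ch in js:
--         if state == OUT:
--             if ch == '"':
--                 out.append('"')
--                 state = DQ
--             elif ch == APOS:
--                 buf = []
--                 saw = False
--                 state = SQ
--             elif ch == '`':
--                 out.append('`')
--                 state = TPL
--             else:
--                 out.append(ch)
--         elif state == DQ: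
--             if pend:
--                 out.append(APOS if ch == APOS else BACKSLASH + ch)
--                 pend = False
--             elif ch == BACKSLASH:
--                 pend = True
--             elif ch == '"':
--                 out.append('"')
--                 state = OUT
--             else:
--                 out.append(ch)
--         elif state == SQ:
--             if pend:
--                 if ch == APOS:
--                     buf.append(APOS)
--                     saw = True
--                 else:
--                     buf.append(BACKSLASH + ch)
--                 pend = False
--             elif ch == BACKSLASH:
--                 pend = True
--             elif ch == APOS:
--                 out.append(flush_single())
--                 state = OUT
--             else:
--                 buf.append(ch)
--         else:  # TPL
--             if pend:
--                 out.append(BACKSLASH + ch)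
--                 pend = False
--             elif ch == BACKSLASH:
--                 pend = True
--             elif ch == '`':
--                 out.append('`')
--                 state = OUT
--             else:
--                 out.append(ch)
--
--     # end of input: a dangling backslash is an ordinary literal character
--     if pend:
--         if state == SQ:
--             buf.append(BACKSLASH)
--         else:
--             out.append(BACKSLASH)
--     if state == SQ:
--         out.append(flush_single())
--     return ''.join(out)
-- ===== Notes on version B (the rewrite author's own statement) =====
-- stated objective: alternative
-- what changed: A's outer loop with three duplicated index-driven inner scanning loops is replaced by a single flat pass over the characters driven by an explicit state machine (outside / double / single / template mode plus a pending-backslash flag), with the single-quote content buffered and rendered when the string closes or input ends.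
import Mathlib
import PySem

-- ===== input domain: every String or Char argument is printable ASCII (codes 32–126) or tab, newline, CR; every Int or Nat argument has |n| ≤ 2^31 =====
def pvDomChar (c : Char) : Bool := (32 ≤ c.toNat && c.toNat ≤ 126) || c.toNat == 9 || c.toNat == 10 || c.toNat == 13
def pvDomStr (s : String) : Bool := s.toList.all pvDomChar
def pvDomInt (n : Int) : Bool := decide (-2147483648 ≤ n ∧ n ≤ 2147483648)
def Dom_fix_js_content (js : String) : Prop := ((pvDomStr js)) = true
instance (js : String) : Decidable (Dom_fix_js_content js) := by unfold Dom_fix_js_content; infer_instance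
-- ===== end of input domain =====

-- B replaces A's nested index-driven scanning loops by one flat character-at-a-time
-- state machine (objective: alternative structure, same cost).

-- ===== PORT A =====
-- A's inner while-loop for a double-quoted string: returns (collected segment incl. the
-- closing quote if found, remaining characters). The two-element pattern carries the
-- Python guard `j + 1 < n`.
def pvA_dq : List Char → List Char × List Char
  | [] => ([], [])
  | [c] => if c = '"' then (['"'], []) else ([c], [])
  | c :: d :: rest =>
    if c = '\\' then
      if d = '\'' then
        let t := pvA_dq rest
        ('\'' :: t.1, t.2)
      else
        let t := pvA_dq rest
        (c :: d :: t.1, t.2)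
    else if c = '"' then (['"'], d :: rest)
    else
      let t := pvA_dq (d :: rest)
      (c :: t.1, t.2)

-- A's inner while-loop for a single-quoted string: (inner chars, has_escaped_apos, rest).
def pvA_sq : List Char → List Char × Bool × List Char
  | [] => ([], false, [])
  | [c] => if c = '\'' then ([], false, []) else ([c], false, [])
  | c :: d :: rest =>
    if c = '\\' then
      if d = '\'' then
        let t := pvA_sq rest
        ('\'' :: t.1, true, t.2.2)
      else
        let t := pvA_sq rest
        (c :: d :: t.1, t.2.1, t.2.2)
    else if c = '\'' then ([], false, d :: rest)
    else
      let t := pvA_sq (d :: rest)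
      (c :: t.1, t.2.1, t.2.2)

-- A's inner while-loop for a template literal.
def pvA_tpl : List Char → List Char × List Char
  | [] => ([], [])
  | [c] => if c = '`' then (['`'], []) else ([c], [])
  | c :: d :: rest =>
    if c = '\\' then
      let t := pvA_tpl rest
      (c :: d :: t.1, t.2)
    else if c = '`' then (['`'], d :: rest)
    else
      let t := pvA_tpl (d :: rest)
      (c :: t.1, t.2)

-- termination facts for the outer loop (cited by pvA_main's decreasing_by)
lemma pvA_dq_rest_le : (l : List Char) → (pvA_dq l).2.length ≤ l.length
  | [] => by simp [pvA_dq]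
  | [c] => by by_cases h : c = '"' <;> simp [pvA_dq, h]
  | c :: d :: rest => by
    have h1 := pvA_dq_rest_le rest
    have h2 := pvA_dq_rest_le (d :: rest)
    by_cases hb : c = '\\' <;> by_cases hd : d = '\'' <;> by_cases hc : c = '"' <;>
      simp [pvA_dq, hb, hd, hc] at * <;> omega

lemma pvA_sq_rest_le : (l : List Char) → (pvA_sq l).2.2.length ≤ l.length
  | [] => by simp [pvA_sq]
  | [c] => by by_cases h : c = '\'' <;> simp [pvA_sq, h]
  | c :: d :: rest => by
    have h1 := pvA_sq_rest_le rest
    have h2 := pvA_sq_rest_le (d :: rest)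
    by_cases hb : c = '\\' <;> by_cases hd : d = '\'' <;> by_cases hc : c = '\'' <;>
      simp [pvA_sq, hb, hd, hc] at * <;> omega

lemma pvA_tpl_rest_le : (l : List Char) → (pvA_tpl l).2.length ≤ l.length
  | [] => by simp [pvA_tpl]
  | [c] => by by_cases h : c = '`' <;> simp [pvA_tpl, h]
  | c :: d :: rest => by
    have h1 := pvA_tpl_rest_le rest
    have h2 := pvA_tpl_rest_le (d :: rest)
    by_cases hb : c = '\\' <;> by_cases hc : c = '`' <;>
      simp [pvA_tpl, hb, hc] at * <;> omega

-- A's outer while-loop, dispatching on the current character.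
def pvA_main : List Char → List Char
  | [] => []
  | c :: rest =>
    if c = '"' then
      let t := pvA_dq rest
      ('"' :: t.1) ++ pvA_main t.2
    else if c = '\'' then
      let t := pvA_sq rest
      (if t.2.1 then
        '"' :: (PySem.Chars.replace t.1 ['"'] ['\\', '"'] ++ ['"'])
      else
        '\'' :: (t.1 ++ ['\''])) ++ pvA_main t.2.2
    else if c = '`' then
      let t := pvA_tpl rest
      ('`' :: t.1) ++ pvA_main t.2
    else
      c :: pvA_main rest
termination_by l => l.length
decreasing_by
  · exact Nat.lt_succ_of_le (pvA_dq_rest_le rest)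
  · exact Nat.lt_succ_of_le (pvA_sq_rest_le rest)
  · exact Nat.lt_succ_of_le (pvA_tpl_rest_le rest)
  · exact Nat.lt_succ_self _

def fix_js_content (js : String) : String := String.ofList (pvA_main js.toList)

-- ===== PORT B =====
-- B is one flat pass: an explicit mode (outside / in-double / in-single with its buffered
-- content and escaped-apostrophe flag / in-template), each mode carrying a pending-backslash
-- flag, stepped once per character by a fold; a finaliser flushes leftovers at end of input.
inductive PvMode
  | out : PvMode
  | dq : Bool → PvMode
  | sq : List Char → Bool → Bool → PvMode
  | tpl : Bool → PvMode
deriving DecidableEq, Repr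

-- Source B's flush_single
def pvB_render (inner : List Char) (saw : Bool) : List Char :=
  if saw then '"' :: (PySem.Chars.replace inner ['"'] ['\\', '"'] ++ ['"'])
  else '\'' :: (inner ++ ['\''])

-- Source B's loop body: one transition of the state machine
def pvB_step : PvMode × List Char → Char → PvMode × List Char
  | (.out, acc), c =>
    if c = '"' then (.dq false, acc ++ ['"'])
    else if c = '\'' then (.sq [] false false, acc)
    else if c = '`' then (.tpl false, acc ++ ['`'])
    else (.out, acc ++ [c])
  | (.dq true, acc), c =>
    if c = '\'' then (.dq false, acc ++ ['\''])
    else (.dq false, acc ++ ['\\', c])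
  | (.dq false, acc), c =>
    if c = '\\' then (.dq true, acc)
    else if c = '"' then (.out, acc ++ ['"'])
    else (.dq false, acc ++ [c])
  | (.sq buf saw true, acc), c =>
    if c = '\'' then (.sq (buf ++ ['\'']) true false, acc)
    else (.sq (buf ++ ['\\', c]) saw false, acc)
  | (.sq buf saw false, acc), c =>
    if c = '\\' then (.sq buf saw true, acc)
    else if c = '\'' then (.out, acc ++ pvB_render buf saw)
    else (.sq (buf ++ [c]) saw false, acc)
  | (.tpl true, acc), c => (.tpl false, acc ++ ['\\', c])
  | (.tpl false, acc), c =>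
    if c = '\\' then (.tpl true, acc)
    else if c = '`' then (.out, acc ++ ['`'])
    else (.tpl false, acc ++ [c])

-- Source B's end-of-input flush
def pvB_fin : PvMode × List Char → List Char
  | (.out, acc) => acc
  | (.dq pend, acc) => acc ++ (if pend then ['\\'] else [])
  | (.sq buf saw pend, acc) => acc ++ pvB_render (buf ++ (if pend then ['\\'] else [])) saw
  | (.tpl pend, acc) => acc ++ (if pend then ['\\'] else [])

def fix_js_content_alt (js : String) : String :=
  String.ofList (pvB_fin (js.toList.foldl pvB_step (.out, [])))

-- ===== PRECONDITION & SPEC =====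
def Spec_fix_js_content (js : String) (out : String) : Prop := out = fix_js_content_alt js
instance (js : String) (out : String) : Decidable (Spec_fix_js_content js out) := by unfold Spec_fix_js_content; infer_instance

-- ===== CLAIM =====
def Claim_equal_fix_js_content : Prop := ∀ (js : String), Dom_fix_js_content js → Spec_fix_js_content js (fix_js_content js)

-- ===== LEMMAS AND PROOFS =====

-- What A's program still produces from a given machine state and the remaining input.
def pvCont : PvMode → List Char → List Char
  | .out, l => pvA_main l
  | .dq pend, l =>
    let t := pvA_dq ((if pend then ['\\'] else []) ++ l)
    t.1 ++ pvA_main t.2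
  | .sq buf saw pend, l =>
    let t := pvA_sq ((if pend then ['\\'] else []) ++ l)
    pvB_render (buf ++ t.1) (saw || t.2.1) ++ pvA_main t.2.2
  | .tpl pend, l =>
    let t := pvA_tpl ((if pend then ['\\'] else []) ++ l)
    t.1 ++ pvA_main t.2

lemma pvA_dq_close (l : List Char) : pvA_dq ('"' :: l) = (['"'], l) := by
  cases l <;> simp [pvA_dq]

lemma pvA_dq_other (c : Char) (l : List Char) (hb : c ≠ '\\') (hc : c ≠ '"') :
    pvA_dq (c :: l) = (c :: (pvA_dq l).1, (pvA_dq l).2) := by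
  cases l <;> simp [pvA_dq, hb, hc]

lemma pvA_sq_close (l : List Char) : pvA_sq ('\'' :: l) = ([], false, l) := by
  cases l <;> simp [pvA_sq]

lemma pvA_sq_other (c : Char) (l : List Char) (hb : c ≠ '\\') (hc : c ≠ '\'') :
    pvA_sq (c :: l) = (c :: (pvA_sq l).1, (pvA_sq l).2.1, (pvA_sq l).2.2) := by
  cases l <;> simp [pvA_sq, hb, hc]

lemma pvA_tpl_close (l : List Char) : pvA_tpl ('`' :: l) = (['`'], l) := by
  cases l <;> simp [pvA_tpl]

lemma pvA_tpl_other (c : Char) (l : List Char) (hb : c ≠ '\\') (hc : c ≠ '`') :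
    pvA_tpl (c :: l) = (c :: (pvA_tpl l).1, (pvA_tpl l).2) := by
  cases l <;> simp [pvA_tpl, hb, hc]

lemma run_eq : (l : List Char) → ∀ (m : PvMode) (acc : List Char),
    pvB_fin (l.foldl pvB_step (m, acc)) = acc ++ pvCont m l
  | [], m, acc => by
    cases m with
    | out => simp [pvB_fin, pvCont, pvA_main]
    | dq pend => cases pend <;> simp [pvB_fin, pvCont, pvA_dq, pvA_main]
    | sq buf saw pend => cases pend <;> simp [pvB_fin, pvCont, pvA_sq, pvA_main]
    | tpl pend => cases pend <;> simp [pvB_fin, pvCont, pvA_tpl, pvA_main]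
  | c :: l, m, acc => by
    have ih := run_eq l
    cases m with
    | out =>
      by_cases h1 : c = '"'
      · subst h1
        simp [List.foldl, pvB_step, ih, pvCont, pvA_main]
      · by_cases h2 : c = '\''
        · subst h2
          simp [List.foldl, pvB_step, ih, pvCont, pvA_main, pvB_render]
        · by_cases h3 : c = '`'
          · subst h3
            simp [List.foldl, pvB_step, ih, pvCont, pvA_main]
          · simp [List.foldl, pvB_step, h1, h2, h3, ih, pvCont, pvA_main]
    | dq pend =>
      cases pend with
      | true =>
        by_cases h : c = '\''
        · subst h; simp [List.foldl, pvB_step, ih, pvCont, pvA_dq]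
        · simp [List.foldl, pvB_step, h, ih, pvCont, pvA_dq]
      | false =>
        by_cases hb : c = '\\'
        · subst hb; simp [List.foldl, pvB_step, ih, pvCont]
        · by_cases hc : c = '"'
          · subst hc; simp [List.foldl, pvB_step, hb, ih, pvCont, pvA_dq_close]
          · simp [List.foldl, pvB_step, hb, hc, ih, pvCont, pvA_dq_other c l hb hc]
    | sq buf saw pend =>
      cases pend with
      | true =>
        by_cases h : c = '\''
        · subst h; simp [List.foldl, pvB_step, ih, pvCont, pvA_sq]
        · simp [List.foldl, pvB_step, h, ih, pvCont, pvA_sq]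
      | false =>
        by_cases hb : c = '\\'
        · subst hb; simp [List.foldl, pvB_step, ih, pvCont]
        · by_cases hc : c = '\''
          · subst hc
            simp [List.foldl, pvB_step, hb, ih, pvCont, pvA_sq_close]
          · simp [List.foldl, pvB_step, hb, hc, ih, pvCont, pvA_sq_other c l hb hc]
    | tpl pend =>
      cases pend with
      | true => simp [List.foldl, pvB_step, ih, pvCont, pvA_tpl]
      | false =>
        by_cases hb : c = '\\'
        · subst hb; simp [List.foldl, pvB_step, ih, pvCont]
        · by_cases hc : c = '`'
          · subst hc; simp [List.foldl, pvB_step, hb, ih, pvCont, pvA_tpl_close]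
          · simp [List.foldl, pvB_step, hb, hc, ih, pvCont, pvA_tpl_other c l hb hc]

-- ===== VERDICT =====
theorem fix_js_content_spec : Claim_equal_fix_js_content := by
  intro js _
  unfold Spec_fix_js_content fix_js_content fix_js_content_alt
  rw [run_eq]
  simp [pvCont]
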